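-- pv_equiv track=rewrite | github.com/gabriellaec/desoft-analise-exercicios | backup/user_268/ch47_2020_04_10_15_05_35_904595.py | estritamente_crescente
-- ===== SOURCE A (Python) =====
-- def estritamente_crescente(lista):
--     a = len(lista)
--     listo = []
--     if a == 0:
--         return listo
--     else:
--         listo.append(lista[0])
--         for i in range(1, a):
--             if lista[i] > lista [i-1]:
--                 listo.append(lista[i])
--             else:
--                 return listo
--         return listo
-- ===== SOURCE B (Python) =====
-- def estritamente_crescente(lista):
--     # recursive decomposition: consume the tail element by element,
--     # keeping only the strictly increasing run after the head
--     def go(prev, rest):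
--         if rest and rest[0] > prev:
--             return [rest[0]] + go(rest[0], rest[1:])
--         return []
--     if not lista:
--         return []
--     return [lista[0]] + go(lista[0], lista[1:])
-- ===== Notes on version B (the rewrite author's own statement) =====
-- stated objective: alternative
-- what changed: B is a structural recursion on the list (head plus a recursive helper carrying the previous element), instead of A's index-based for-loop appending into an accumulator with an early return.
import Mathlib
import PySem

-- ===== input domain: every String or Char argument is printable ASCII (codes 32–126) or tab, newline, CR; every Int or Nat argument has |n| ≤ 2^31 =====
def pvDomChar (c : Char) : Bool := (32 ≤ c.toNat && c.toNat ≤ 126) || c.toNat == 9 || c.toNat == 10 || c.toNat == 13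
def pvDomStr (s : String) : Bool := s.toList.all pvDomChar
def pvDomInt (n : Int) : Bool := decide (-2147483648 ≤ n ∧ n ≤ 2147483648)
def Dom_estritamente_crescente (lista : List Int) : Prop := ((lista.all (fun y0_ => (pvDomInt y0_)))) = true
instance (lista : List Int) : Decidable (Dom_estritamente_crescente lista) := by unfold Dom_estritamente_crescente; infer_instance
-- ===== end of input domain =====

-- B replaces A's index-based accumulator loop by a structural recursion on the list; objective: alternative.

-- ===== PORT A =====
-- A's for-loop over range(1, a): appends lista[i] while strictly increasing, early-returns listo otherwise
def pvLoopA (lista : List Int) (listo : List Int) (i : Nat) : List Int :=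
  if i < lista.length then
    if lista.getD i 0 > lista.getD (i - 1) 0 then
      pvLoopA lista (listo ++ [lista.getD i 0]) (i + 1)
    else listo
  else listo
termination_by lista.length - i

def estritamente_crescente (lista : List Int) : List Int :=
  if lista.length = 0 then []
  else pvLoopA lista [lista.getD 0 0] 1

-- ===== PORT B =====
-- B's helper go(prev, rest): structural recursion keeping the strictly increasing run
def pvGo (prev : Int) : List Int → List Int
  | x :: rest => if x > prev then x :: pvGo x rest else []
  | [] => []

def estritamente_crescente_alt : List Int → List Int
  | [] => []
  | x :: xs => x :: pvGo x xs

-- ===== PRECONDITION & SPEC =====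
def Spec_estritamente_crescente (lista : List Int) (out : List Int) : Prop := out = estritamente_crescente_alt lista
instance (lista : List Int) (out : List Int) : Decidable (Spec_estritamente_crescente lista out) := by unfold Spec_estritamente_crescente; infer_instance

-- ===== CLAIM =====
def Claim_equal_estritamente_crescente : Prop := ∀ (lista : List Int), Dom_estritamente_crescente lista → Spec_estritamente_crescente lista (estritamente_crescente lista)

-- ===== LEMMAS AND PROOFS =====

-- A's index loop from position i (i ≥ 1) appends exactly B's structural run over the remaining tail
theorem pvLoopA_eq_go (lista listo : List Int) (i : Nat) (hi : 1 ≤ i) :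
    pvLoopA lista listo i = listo ++ pvGo (lista.getD (i - 1) 0) (lista.drop i) := by
  unfold pvLoopA
  split
  · rename_i h
    have hdrop : lista.drop i = lista.getD i 0 :: lista.drop (i + 1) := by
      rw [List.getD_eq_getElem?_getD, List.drop_eq_getElem_cons h]
      simp [List.getElem?_eq_getElem h]
    rw [hdrop]
    by_cases hc : lista.getD i 0 > lista.getD (i - 1) 0
    · simp only [pvGo, hc, if_pos]
      rw [pvLoopA_eq_go lista (listo ++ [lista.getD i 0]) (i + 1) (by omega)]
      have : i + 1 - 1 = i := by omega
      rw [this, List.append_assoc]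
      rfl
    · simp only [pvGo, if_neg hc]
      simp
  · rename_i h
    rw [List.drop_eq_nil_of_le (by omega)]
    simp [pvGo]
termination_by lista.length - i

-- ===== VERDICT =====
theorem estritamente_crescente_spec : Claim_equal_estritamente_crescente := by
  intro lista _
  show estritamente_crescente lista = estritamente_crescente_alt lista
  unfold estritamente_crescente
  cases lista with
  | nil => simp [estritamente_crescente_alt]
  | cons x xs =>
    simp only [List.length_cons, Nat.succ_ne_zero, ite_false, if_neg (Nat.succ_ne_zero _)]
    rw [pvLoopA_eq_go _ _ 1 le_rfl]
    simp [estritamente_crescente_alt, List.getD]
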